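-- pv_equiv track=rewrite | github.com/pypi-data/pypi-mirror-76 | packages/bip-utils/bip_utils-1.2.0.tar.gz/bip_utils-1.2.0/bip_utils/utils.py | ConvertToBits
-- ===== SOURCE A (Python) =====
-- def ConvertToBits(data, from_bits, to_bits, pad = True):
--     """ Perform generic bits conversion.
--
--     Args:
--         data (list or bytes): Data to be converted
--         from_bits (int)     : Number of bits to start from
--         to_bits (int)       : Number of bits at the end
--         pad (bool)          : True if data must be padded, false otherwise
--
--     Returns:
--         list: List of converted bits, None in case of errors
--     """
--
--     acc = 0
--     bits = 0
--     ret = []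
--     maxv = (1 << to_bits) - 1
--     max_acc = (1 << (from_bits + to_bits - 1)) - 1
--
--     for value in data:
--         if value < 0 or (value >> from_bits):
--             return None
--         acc = ((acc << from_bits) | value) & max_acc
--         bits += from_bits
--         while bits >= to_bits:
--             bits -= to_bits
--             ret.append((acc >> bits) & maxv)
--     if pad:
--         if bits:
--             ret.append((acc << (to_bits - bits)) & maxv)
--     elif bits >= from_bits or ((acc << (to_bits - bits)) & maxv):
--         return None
--
--     return ret
-- ===== SOURCE B (Python) =====
-- def ConvertToBits(data, from_bits, to_bits, pad = True):
--     """ Big-integer re-implementation: concatenate all values into one integer,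
--     then slice fixed-width chunks from the MSB end. """
--     big = 0
--     for value in data:
--         if value < 0 or (value >> from_bits):
--             return None
--         big = (big << from_bits) | value
--     total = len(data) * from_bits
--     maxv = (1 << to_bits) - 1
--     ret = [(big >> (total - (i + 1) * to_bits)) & maxv for i in range(total // to_bits)]
--     leftover = total % to_bits
--     if pad:
--         if leftover:
--             ret.append((big << (to_bits - leftover)) & maxv)
--     elif leftover >= from_bits or ((big << (to_bits - leftover)) & maxv):
--         return None
--     return ret
-- ===== Notes on version B (the rewrite author's own statement) =====
-- stated objective: alternative
-- what changed: Replaces A's streaming accumulator/bit-counter state machine (append to a masked accumulator, emit inside a nested while-loop) with a pass that concatenates all values into one big integer and then slices each output chunk directly by a shift-and-mask formula over range(total // to_bits).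
-- outside the precondition, e.g. on ConvertToBits([], 1, 0, True): A returns [], B raises ZeroDivisionError; on ConvertToBits([1], 1, -1, True): A raises ValueError, B raises ValueError; on ConvertToBits([1], -1, 2, True): A raises ValueError, B raises ValueError
import Mathlib
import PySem

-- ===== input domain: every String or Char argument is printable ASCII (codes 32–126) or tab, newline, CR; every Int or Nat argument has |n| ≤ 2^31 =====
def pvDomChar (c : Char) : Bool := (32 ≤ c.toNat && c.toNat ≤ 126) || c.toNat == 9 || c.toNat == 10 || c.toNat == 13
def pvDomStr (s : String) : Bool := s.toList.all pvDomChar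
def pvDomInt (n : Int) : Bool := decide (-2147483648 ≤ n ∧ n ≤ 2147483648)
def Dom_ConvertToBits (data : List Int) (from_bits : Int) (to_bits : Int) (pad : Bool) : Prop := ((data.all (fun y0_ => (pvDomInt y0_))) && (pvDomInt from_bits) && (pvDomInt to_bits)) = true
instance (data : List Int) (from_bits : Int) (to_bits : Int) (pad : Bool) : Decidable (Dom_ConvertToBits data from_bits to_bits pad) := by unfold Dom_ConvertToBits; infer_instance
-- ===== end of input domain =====

-- B replaces A's streaming accumulator/bit-counter state machine by concatenating the data
-- into one big integer and slicing each output chunk with a direct shift-and-mask formula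
-- (objective: alternative; not faster).

-- Python `a << k` / `a >> k`: exact whenever 0 ≤ k (Pre_ makes every shift count nonnegative).
def pyShl (a k : Int) : Int := a <<< k.toNat
def pyShr (a k : Int) : Int := a >>> k.toNat

-- ===== PORT A =====
-- the `while bits >= to_bits:` loop; fuel = bits.toNat suffices since 1 ≤ to_bits (Pre_)
def CTB_inner : Nat → Int → Int → Int → Int → List Int → Int × List Int
  | 0, _, _, _, bits, ret => (bits, ret)
  | fuel + 1, tb, maxv, acc, bits, ret =>
    if tb ≤ bits then
      CTB_inner fuel tb maxv acc (bits - tb) (ret ++ [PySem.Int.band (pyShr acc (bits - tb)) maxv])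
    else (bits, ret)

-- one iteration of `for value in data:` (none = the early `return None`)
def CTB_step (fb tb maxv maxAcc : Int) : Option (Int × Int × List Int) → Int → Option (Int × Int × List Int)
  | none, _ => none
  | some (acc, bits, ret), value =>
    if value < 0 ∨ pyShr value fb ≠ 0 then none
    else
      -- `(acc << from_bits) | value`
      let acc' := PySem.Int.band (PySem.Int.bor (pyShl acc fb) value) maxAcc
      let bits' := bits + fb
      match CTB_inner bits'.toNat tb maxv acc' bits' ret with
      | (bits'', ret') => some (acc', bits'', ret')

def ConvertToBits (data : List Int) (from_bits : Int) (to_bits : Int) (pad : Bool) : Option (List Int) :=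
  let maxv := pyShl 1 to_bits - 1
  let maxAcc := pyShl 1 (from_bits + to_bits - 1) - 1
  match data.foldl (CTB_step from_bits to_bits maxv maxAcc) (some (0, 0, [])) with
  | none => none
  | some (acc, bits, ret) =>
    if pad then
      if bits ≠ 0 then some (ret ++ [PySem.Int.band (pyShl acc (to_bits - bits)) maxv]) else some ret
    else if from_bits ≤ bits ∨ PySem.Int.band (pyShl acc (to_bits - bits)) maxv ≠ 0 then none
    else some ret

-- ===== PORT B =====
-- `big = (big << from_bits) | value` with the validity check (none = the early `return None`)
def CTB_big (fb : Int) : Option Int → Int → Option Int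
  | none, _ => none
  | some big, value =>
    if value < 0 ∨ pyShr value fb ≠ 0 then none
    else some (PySem.Int.bor (pyShl big fb) value)

def ConvertToBits_alt (data : List Int) (from_bits : Int) (to_bits : Int) (pad : Bool) : Option (List Int) :=
  match data.foldl (CTB_big from_bits) (some 0) with
  | none => none
  | some big =>
    let total : Int := data.length * from_bits
    let maxv := pyShl 1 to_bits - 1
    let ret := (PySem.List.pyRange 0 (PySem.Int.floordiv total to_bits) 1).map
      (fun i => PySem.Int.band (pyShr big (total - (i + 1) * to_bits)) maxv)
    let leftover := PySem.Int.mod total to_bits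
    if pad then
      if leftover ≠ 0 then some (ret ++ [PySem.Int.band (pyShl big (to_bits - leftover)) maxv]) else some ret
    else if from_bits ≤ leftover ∨ PySem.Int.band (pyShl big (to_bits - leftover)) maxv ≠ 0 then none
    else some ret

-- ===== PRECONDITION & SPEC =====
-- Pre_ excludes the inputs on which A raises ValueError on a negative shift count
-- (from_bits < 0 with nonempty data, or from_bits + to_bits - 1 < 0) or where to_bits ≤ 0
-- makes A raise or loop forever in the emit loop — except the degenerate to_bits = 0 with
-- empty data, where A accidentally returns [] while B raises ZeroDivisionError in `total // to_bits`.
def Pre_ConvertToBits (data : List Int) (from_bits : Int) (to_bits : Int) (pad : Bool) : Prop :=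
  1 ≤ to_bits ∧ (0 ≤ from_bits ∨
    (0 ≤ from_bits + to_bits - 1 ∧ (data = [] ∨ data.headD 0 < 0)))
instance (data : List Int) (from_bits : Int) (to_bits : Int) (pad : Bool) : Decidable (Pre_ConvertToBits data from_bits to_bits pad) := by unfold Pre_ConvertToBits; infer_instance

def pvWitness_ConvertToBits : List Int × Int × Int × Bool := ([3, 7, 21], 5, 8, true)

def Spec_ConvertToBits (data : List Int) (from_bits : Int) (to_bits : Int) (pad : Bool) (out : Option (List Int)) : Prop := out = ConvertToBits_alt data from_bits to_bits pad
instance (data : List Int) (from_bits : Int) (to_bits : Int) (pad : Bool) (out : Option (List Int)) : Decidable (Spec_ConvertToBits data from_bits to_bits pad out) := by unfold Spec_ConvertToBits; infer_instance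

-- ===== CLAIM (what is proved, stated in full; the proofs are below) =====
def Claim_equal_ConvertToBits : Prop := ∀ (data : List Int) (from_bits : Int) (to_bits : Int) (pad : Bool), Dom_ConvertToBits data from_bits to_bits pad → Pre_ConvertToBits data from_bits to_bits pad → Spec_ConvertToBits data from_bits to_bits pad (ConvertToBits data from_bits to_bits pad)

-- ===== LEMMAS AND PROOFS =====

-- the big integer both programs accumulate, over a prefix already worth `N`
def bigN (f : Nat) (N : Nat) (data : List Int) : Nat :=
  data.foldl (fun n v => n * 2 ^ f + v.toNat) N

-- the list of t-bit chunks of N read from the MSB end of a T-bit window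
def chunks (N T t : Nat) : List Int :=
  (List.range (T / t)).map (fun i => (((N / 2 ^ (T - (i + 1) * t)) % 2 ^ t : Nat) : Int))

theorem chunks_T_zero (N t : Nat) : chunks N 0 t = [] := by
  simp [chunks]

-- disjoint or is addition
theorem lor_disjoint (f : Nat) : ∀ (a v : Nat), v < 2 ^ f → a * 2 ^ f ||| v = a * 2 ^ f + v := by
  induction f with
  | zero => intro a v h; interval_cases v <;> simp
  | succ f ih =>
    intro a v h
    have hv2 : v / 2 < 2 ^ f := by
      have h2 : v < 2 * 2 ^ f := by
        have := h; rw [Nat.pow_succ] at this; omega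
      omega
    have h2 : Nat.bit (v.testBit 0) (v / 2) = v := by
      have := Nat.bit_testBit_zero_shiftRight_one v
      rwa [Nat.shiftRight_one] at this
    have h1 : a * 2 ^ (f + 1) ||| v = Nat.bit false (a * 2 ^ f) ||| Nat.bit (v.testBit 0) (v / 2) := by
      rw [h2]
      congr 1
      simp [Nat.bit, Nat.pow_succ]; ring
    rw [h1, Nat.lor_bit, ih _ _ hv2]
    cases hb : v.testBit 0 <;>
      simp only [Nat.bit, Bool.false_or, cond_true, cond_false] <;>
    · rw [Nat.testBit_zero] at hb
      simp only [decide_eq_true_eq, decide_eq_false_iff_not] at hb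
      have hv := Nat.div_add_mod v 2
      have h3 : a * 2 ^ (f + 1) = 2 * (a * 2 ^ f) := by rw [Nat.pow_succ]; ring
      omega

-- masking to m low bits is invisible through `>> b` then `% 2^t` when b + t ≤ m
theorem mask_div_mod (N b t m : Nat) (h : b + t ≤ m) :
    N % 2 ^ m / 2 ^ b % 2 ^ t = N / 2 ^ b % 2 ^ t := by
  have hdvd : (2 ^ b * 2 ^ t : Nat) ∣ 2 ^ m := by
    rw [← Nat.pow_add]; exact Nat.pow_dvd_pow 2 h
  calc N % 2 ^ m / 2 ^ b % 2 ^ t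
      = N % 2 ^ m % (2 ^ b * 2 ^ t) / 2 ^ b := (Nat.mod_mul_right_div_self _ _ _).symm
    _ = N % (2 ^ b * 2 ^ t) / 2 ^ b := by rw [Nat.mod_mod_of_dvd _ hdvd]
    _ = N / 2 ^ b % 2 ^ t := Nat.mod_mul_right_div_self _ _ _

-- masking to m low bits is invisible through `<< s` then `% 2^t` when t ≤ m + s
theorem mask_mul_mod (N s t m : Nat) (h : t ≤ m + s) :
    N % 2 ^ m * 2 ^ s % 2 ^ t = N * 2 ^ s % 2 ^ t := by
  by_cases hts : t ≤ s
  · have hdvd : (2 ^ t : Nat) ∣ 2 ^ s := Nat.pow_dvd_pow 2 hts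
    have d1 : (2 ^ t : Nat) ∣ N % 2 ^ m * 2 ^ s := Dvd.dvd.mul_left hdvd _
    have d2 : (2 ^ t : Nat) ∣ N * 2 ^ s := Dvd.dvd.mul_left hdvd _
    rw [Nat.mod_eq_zero_of_dvd d1, Nat.mod_eq_zero_of_dvd d2]
  · have h2 : (2:Nat) ^ t = 2 ^ (t - s) * 2 ^ s := by rw [← Nat.pow_add]; congr 1; omega
    rw [h2, Nat.mul_mod_mul_right, Nat.mul_mod_mul_right, Nat.mod_mod_of_dvd]
    exact Nat.pow_dvd_pow 2 (by omega)

-- appending w (< 2^f) below N is invisible through `>> (u + f)`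
theorem drop_low (N w f u : Nat) (hw : w < 2 ^ f) :
    (N * 2 ^ f + w) / 2 ^ (u + f) = N / 2 ^ u := by
  rw [show (2:Nat) ^ (u + f) = 2 ^ f * 2 ^ u by rw [← Nat.pow_add]; congr 1; omega]
  rw [← Nat.div_div_eq_div_mul]
  congr 1
  rw [show N * 2 ^ f + w = w + N * 2 ^ f by ring]
  rw [Nat.add_mul_div_right _ _ (Nat.two_pow_pos f), Nat.div_eq_of_lt hw]
  omega

theorem pyShl_natCast (a s : Nat) : pyShl ((a : Nat) : Int) ((s : Nat) : Int) = ((a * 2 ^ s : Nat) : Int) := by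
  simp [pyShl, Int.shiftLeft_eq]

theorem pyShr_natCast (a k : Nat) : pyShr ((a : Nat) : Int) ((k : Nat) : Int) = ((a / 2 ^ k : Nat) : Int) := by
  simp [pyShr, Int.shiftRight_eq_div_pow]

theorem band_mask (a t : Nat) :
    PySem.Int.band ((a : Nat) : Int) ((2 : Int) ^ t - 1) = ((a % 2 ^ t : Nat) : Int) := by
  have h1 : ((2 : Int) ^ t - 1) = ((2 ^ t - 1 : Nat) : Int) := by
    push_cast [Nat.cast_sub (Nat.one_le_two_pow)]; ring
  calc PySem.Int.band ((a : Nat) : Int) ((2 : Int) ^ t - 1)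
      = PySem.Int.band ((a : Nat) : Int) ((2 ^ t - 1 : Nat) : Int) := by rw [h1]
    _ = (((a &&& (2 ^ t - 1) : Nat)) : Int) := PySem.Int.band_natCast _ _
    _ = ((a % 2 ^ t : Nat) : Int) := by rw [Nat.and_two_pow_sub_one_eq_mod]

-- `(a << f) | v` on nonneg ints with v < 2^f, as Nat arithmetic
theorem bor_shl (a : Nat) (v : Int) (f : Nat) (hv0 : 0 ≤ v) (hvlt : v < 2 ^ f) :
    PySem.Int.bor (pyShl (a : Int) ((f : Nat) : Int)) v = ((a * 2 ^ f + v.toNat : Nat) : Int) := by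
  have hv : v = ((v.toNat : Nat) : Int) := (Int.toNat_of_nonneg hv0).symm
  have hvn : v.toNat < 2 ^ f := by
    have : ((v.toNat : Nat) : Int) < ((2 ^ f : Nat) : Int) := by rw [← hv]; push_cast; omega
    exact_mod_cast this
  rw [pyShl_natCast, hv, PySem.Int.bor_natCast, lor_disjoint f _ _ hvn]
  simp

theorem check_true_of_invalid (f : Nat) (v : Int) (hbad : ¬ (0 ≤ v ∧ v < 2 ^ f)) :
    (v < 0 ∨ pyShr v ((f : Nat) : Int) ≠ 0) := by
  by_cases hv : v < 0
  · exact Or.inl hv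
  · right
    have h0 : 0 ≤ v := by omega
    have h2 : (2:Int) ^ f ≤ v := by
      rcases not_and_or.mp hbad with h | h
      · omega
      · omega
    have h3 : 1 ≤ v / (2:Int) ^ f := by
      rw [Int.le_ediv_iff_mul_le (by positivity)]
      omega
    have hgoal : v / (2:Int) ^ f ≠ 0 := by omega
    simpa only [pyShr, Int.toNat_natCast, Int.shiftRight_eq_div_pow] using hgoal

theorem check_false_of_valid (f : Nat) (v : Int) (hv0 : 0 ≤ v) (hvlt : v < 2 ^ f) :
    ¬ (v < 0 ∨ pyShr v ((f : Nat) : Int) ≠ 0) := by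
  push_neg
  refine ⟨by omega, ?_⟩
  simp only [pyShr, Int.toNat_natCast, Int.shiftRight_eq_div_pow]
  exact Int.ediv_eq_zero_of_lt hv0 hvlt

-- the inner while-loop, fully characterised
theorem CTB_inner_spec (t : Nat) (ht : 1 ≤ t) (maxv acc : Int) :
    ∀ (fuel B : Nat), B ≤ fuel → ∀ ret : List Int,
    CTB_inner fuel ((t : Nat) : Int) maxv acc ((B : Nat) : Int) ret
      = (((B % t : Nat) : Int),
         ret ++ (List.range (B / t)).map
           (fun j => PySem.Int.band (pyShr acc (((B - (j + 1) * t : Nat) : Nat) : Int)) maxv)) := by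
  intro fuel
  induction fuel with
  | zero =>
    intro B hB ret
    have hB0 : B = 0 := by omega
    subst hB0
    simp [CTB_inner]
  | succ fuel ih =>
    intro B hB ret
    by_cases htB : t ≤ B
    · have hc : ((t : Nat) : Int) ≤ ((B : Nat) : Int) := by exact_mod_cast htB
      have hcast : ((B : Nat) : Int) - ((t : Nat) : Int) = (((B - t : Nat) : Nat) : Int) := by omega
      simp only [CTB_inner, if_pos hc, hcast]
      rw [ih (B - t) (by omega) _]
      have hmod : (B - t) % t = B % t := by
        conv_rhs => rw [← Nat.sub_add_cancel htB, Nat.add_mod_right]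
      have hdivB : B / t = (B - t) / t + 1 := by
        conv_lhs => rw [← Nat.sub_add_cancel htB, Nat.add_div_right _ (by omega)]
      rw [hmod, hdivB, List.range_succ_eq_map, List.map_cons, List.map_map]
      rw [List.append_assoc]
      simp only [Prod.mk.injEq, true_and]
      rw [List.singleton_append]
      congr 1
      simp only [List.cons.injEq]
      constructor
      · norm_num
      · apply List.map_congr_left
        intro j hj
        have hexp : (j + 1 + 1) * t = (j + 1) * t + t := by ring
        have hidx : B - t - (j + 1) * t = B - (j + 1 + 1) * t := by omega
        simp only [Function.comp_apply, Nat.succ_eq_add_one, hidx]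
    · have hc : ¬ ((t : Nat) : Int) ≤ ((B : Nat) : Int) := by exact_mod_cast htB
      simp only [CTB_inner, if_neg hc]
      rw [Nat.mod_eq_of_lt (by omega), Nat.div_eq_of_lt (by omega)]
      simp

-- one step of A's fold, on the invariant state
theorem CTB_step_spec (f t : Nat) (ht : 1 ≤ t) (N T : Nat) (r0 : List Int) (v : Int)
    (hv0 : 0 ≤ v) (hvlt : v < 2 ^ f) :
    CTB_step ((f : Nat) : Int) ((t : Nat) : Int) ((2 : Int) ^ t - 1) ((2 : Int) ^ (f + t - 1) - 1)
      (some (((N % 2 ^ (f + t - 1) : Nat) : Int), ((T % t : Nat) : Int), r0 ++ chunks N T t)) v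
    = some ((((N * 2 ^ f + v.toNat) % 2 ^ (f + t - 1) : Nat) : Int),
            (((T + f) % t : Nat) : Int),
            r0 ++ chunks (N * 2 ^ f + v.toNat) (T + f) t) := by
  have hvn : v.toNat < 2 ^ f := by
    have h1 : v = ((v.toNat : Nat) : Int) := (Int.toNat_of_nonneg hv0).symm
    have : ((v.toNat : Nat) : Int) < ((2 ^ f : Nat) : Int) := by rw [← h1]; push_cast; omega
    exact_mod_cast this
  have hacc : PySem.Int.band (PySem.Int.bor (pyShl ((N % 2 ^ (f + t - 1) : Nat) : Int) ((f : Nat) : Int)) v) ((2 : Int) ^ (f + t - 1) - 1)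
      = (((N * 2 ^ f + v.toNat) % 2 ^ (f + t - 1) : Nat) : Int) := by
    rw [bor_shl _ v f hv0 hvlt, band_mask]
    congr 1
    rw [Nat.add_mod, Nat.mod_mul_mod, ← Nat.add_mod]
  have hbits : ((T % t : Nat) : Int) + ((f : Nat) : Int) = ((T % t + f : Nat) : Int) := by push_cast; ring
  simp only [CTB_step, if_neg (check_false_of_valid f v hv0 hvlt), hacc, hbits, Int.toNat_natCast]
  rw [CTB_inner_spec t ht _ _ (T % t + f) (T % t + f) le_rfl]
  have hTm : T % t < t := Nat.mod_lt T (by omega)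
  dsimp only
  rw [Nat.mod_add_mod]
  simp only [Option.some.injEq, Prod.mk.injEq, true_and]
  rw [List.append_assoc]
  congr 1
  -- chunks N T t ++ emits = chunks (N*2^f+w) (T+f) t
  have hTf : (T + f) / t = T / t + (T % t + f) / t := by
    conv_lhs => rw [← Nat.div_add_mod T t, Nat.add_assoc, Nat.mul_add_div (by omega)]
  unfold chunks
  rw [hTf, List.range_add, List.map_append, List.map_map]
  congr 1
  · -- old chunks re-read from the extended integer
    apply List.map_congr_left
    intro i hi
    simp only [List.mem_range] at hi
    have hit : (i + 1) * t ≤ T := (Nat.le_div_iff_mul_le (by omega)).mp (by omega)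
    have he : T + f - (i + 1) * t = (T - (i + 1) * t) + f := by omega
    rw [he, drop_low _ _ _ _ hvn]
  · -- the freshly emitted chunks
    apply List.map_congr_left
    intro j hj
    simp only [List.mem_range, Function.comp_apply] at hj ⊢
    have hjt : (j + 1) * t ≤ T % t + f := (Nat.le_div_iff_mul_le (by omega)).mp (by omega)
    have _ := hTm
    have htj : t ≤ (j + 1) * t := Nat.le_mul_of_pos_left t (by omega)
    rw [pyShr_natCast, band_mask]
    have hidx : T + f - (T / t + j + 1) * t = T % t + f - (j + 1) * t := by
      have hexp : (T / t + j + 1) * t = t * (T / t) + (j + 1) * t := by ring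
      have hdm := Nat.div_add_mod T t
      rw [hexp]
      omega
    rw [hidx, mask_div_mod _ _ _ _ (by omega)]

theorem foldA_spec (f t : Nat) (ht : 1 ≤ t) :
    ∀ (data : List Int), (∀ v ∈ data, 0 ≤ v ∧ v < 2 ^ f) → ∀ (N T : Nat) (r0 : List Int),
    List.foldl (CTB_step ((f : Nat) : Int) ((t : Nat) : Int) ((2 : Int) ^ t - 1) ((2 : Int) ^ (f + t - 1) - 1))
      (some (((N % 2 ^ (f + t - 1) : Nat) : Int), ((T % t : Nat) : Int), r0 ++ chunks N T t)) data
    = some (((bigN f N data % 2 ^ (f + t - 1) : Nat) : Int),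
            (((T + f * data.length) % t : Nat) : Int),
            r0 ++ chunks (bigN f N data) (T + f * data.length) t) := by
  intro data
  induction data with
  | nil => intro _ N T r0; simp [bigN]
  | cons v rest ih =>
    intro hvalid N T r0
    have hv := hvalid v (List.mem_cons_self ..)
    rw [List.foldl_cons, CTB_step_spec f t ht N T r0 v hv.1 hv.2]
    rw [ih (fun w hw => hvalid w (List.mem_cons_of_mem _ hw)) (N * 2 ^ f + v.toNat) (T + f) r0]
    have h1 : T + f + f * rest.length = T + f * (rest.length + 1) := by ring
    simp [bigN, h1]

theorem foldA_none (fb tb maxv maxAcc : Int) :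
    ∀ data : List Int, List.foldl (CTB_step fb tb maxv maxAcc) none data = none := by
  intro data; induction data with
  | nil => rfl
  | cons v rest ih => simpa [CTB_step] using ih

theorem foldB_none (fb : Int) :
    ∀ data : List Int, List.foldl (CTB_big fb) none data = none := by
  intro data; induction data with
  | nil => rfl
  | cons v rest ih => simpa [CTB_big] using ih

theorem foldA_invalid (f t : Nat) (ht : 1 ≤ t) :
    ∀ (data : List Int), (¬ ∀ v ∈ data, 0 ≤ v ∧ v < 2 ^ f) → ∀ (N T : Nat) (r0 : List Int),
    List.foldl (CTB_step ((f : Nat) : Int) ((t : Nat) : Int) ((2 : Int) ^ t - 1) ((2 : Int) ^ (f + t - 1) - 1))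
      (some (((N % 2 ^ (f + t - 1) : Nat) : Int), ((T % t : Nat) : Int), r0 ++ chunks N T t)) data = none := by
  intro data
  induction data with
  | nil => intro hbad; exact absurd (by simp) hbad
  | cons v rest ih =>
    intro hbad N T r0
    by_cases hv : 0 ≤ v ∧ v < 2 ^ f
    · rw [List.foldl_cons, CTB_step_spec f t ht N T r0 v hv.1 hv.2]
      exact ih (fun hall => hbad (fun w hw => by
        rcases List.mem_cons.mp hw with rfl | hw'
        · exact hv
        · exact hall w hw')) (N * 2 ^ f + v.toNat) (T + f) r0
    · rw [List.foldl_cons]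
      have : CTB_step ((f : Nat) : Int) ((t : Nat) : Int) ((2 : Int) ^ t - 1) ((2 : Int) ^ (f + t - 1) - 1)
          (some (((N % 2 ^ (f + t - 1) : Nat) : Int), ((T % t : Nat) : Int), r0 ++ chunks N T t)) v = none := by
        simp only [CTB_step, if_pos (check_true_of_invalid f v hv)]
      rw [this, foldA_none]

theorem foldB_valid (f : Nat) :
    ∀ (data : List Int), (∀ v ∈ data, 0 ≤ v ∧ v < 2 ^ f) → ∀ N : Nat,
    List.foldl (CTB_big ((f : Nat) : Int)) (some ((N : Nat) : Int)) data = some ((bigN f N data : Nat) : Int) := by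
  intro data
  induction data with
  | nil => intro _ N; simp [bigN]
  | cons v rest ih =>
    intro hvalid N
    have hv := hvalid v (List.mem_cons_self ..)
    rw [List.foldl_cons]
    have hstep : CTB_big ((f : Nat) : Int) (some ((N : Nat) : Int)) v = some (((N * 2 ^ f + v.toNat : Nat) : Int)) := by
      simp only [CTB_big, if_neg (check_false_of_valid f v hv.1 hv.2), bor_shl _ v f hv.1 hv.2]
    rw [hstep, ih (fun w hw => hvalid w (List.mem_cons_of_mem _ hw))]
    simp [bigN]

theorem foldB_invalid (f : Nat) :
    ∀ (data : List Int), (¬ ∀ v ∈ data, 0 ≤ v ∧ v < 2 ^ f) → ∀ N : Nat,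
    List.foldl (CTB_big ((f : Nat) : Int)) (some ((N : Nat) : Int)) data = none := by
  intro data
  induction data with
  | nil => intro hbad; exact absurd (by simp) hbad
  | cons v rest ih =>
    intro hbad N
    by_cases hv : 0 ≤ v ∧ v < 2 ^ f
    · rw [List.foldl_cons]
      have hstep : CTB_big ((f : Nat) : Int) (some ((N : Nat) : Int)) v = some (((N * 2 ^ f + v.toNat : Nat) : Int)) := by
        simp only [CTB_big, if_neg (check_false_of_valid f v hv.1 hv.2), bor_shl _ v f hv.1 hv.2]
      rw [hstep]
      exact ih (fun hall => hbad (fun w hw => by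
        rcases List.mem_cons.mp hw with rfl | hw'
        · exact hv
        · exact hall w hw')) (N * 2 ^ f + v.toNat)
    · rw [List.foldl_cons]
      have : CTB_big ((f : Nat) : Int) (some ((N : Nat) : Int)) v = none := by
        simp only [CTB_big, if_pos (check_true_of_invalid f v hv)]
      rw [this, foldB_none]

-- the low-bits tail emitted by the pad / no-pad epilogue: masked = unmasked accumulator
theorem tail_mask (Nb f t R : Nat) (ht : 1 ≤ t) (hR : R < t) :
    PySem.Int.band (pyShl ((Nb % 2 ^ (f + t - 1) : Nat) : Int) (((t : Nat) : Int) - ((R : Nat) : Int))) ((2 : Int) ^ t - 1)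
    = PySem.Int.band (pyShl ((Nb : Nat) : Int) (((t : Nat) : Int) - ((R : Nat) : Int))) ((2 : Int) ^ t - 1) := by
  have hcast : ((t : Nat) : Int) - ((R : Nat) : Int) = (((t - R : Nat) : Nat) : Int) := by omega
  rw [hcast, pyShl_natCast, pyShl_natCast, band_mask, band_mask]
  congr 1
  exact mask_mul_mod _ _ _ _ (by omega)

-- B's comprehension over range(total // to_bits) is exactly the chunk list
theorem retB_eq (f t : Nat) (ht : 1 ≤ t) (Nb L : Nat) :
    (PySem.List.pyRange 0 (PySem.Int.floordiv ((f * L : Nat) : Int) ((t : Nat) : Int)) 1).map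
      (fun i => PySem.Int.band (pyShr ((Nb : Nat) : Int) (((f * L : Nat) : Int) - (i + 1) * ((t : Nat) : Int))) ((2 : Int) ^ t - 1))
    = chunks Nb (f * L) t := by
  rw [PySem.Int.floordiv_natCast, PySem.List.pyRange_one]
  have hnn : (0:Int) ≤ ((f * L / t : Nat) : Int) := Int.natCast_nonneg _
  have h0 : ((((f * L / t : Nat) : Int)) - 0).toNat = f * L / t := by
    rw [Int.sub_zero, Int.toNat_natCast]
  rw [h0, List.map_map]
  unfold chunks
  apply List.map_congr_left
  intro i hi
  simp only [List.mem_range, Function.comp_apply] at hi ⊢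
  have hit : (i + 1) * t ≤ f * L := (Nat.le_div_iff_mul_le (by omega)).mp (by omega)
  have hcast : (((f * L : Nat) : Int)) - ((0 : Int) + (i : Int) + 1) * ((t : Nat) : Int)
      = (((f * L - (i + 1) * t : Nat) : Nat) : Int) := by
    push_cast [Nat.cast_sub hit]
    ring
  rw [hcast, pyShr_natCast, band_mask]

-- ===== VERDICT (by name: the statement is the Claim_ definition above) =====
theorem ConvertToBits_spec : Claim_equal_ConvertToBits := by
  intro data fb tb pad _ hpre
  obtain ⟨htb, hor⟩ := hpre
  rcases hor with hf | ⟨_, hE⟩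
  case inr =>
    -- from_bits < 0 is reachable only when the loop body never shifts: empty data, or a
    -- negative first element that makes both programs return None immediately
    cases data with
    | nil =>
      unfold Spec_ConvertToBits ConvertToBits ConvertToBits_alt
      have hm0 : PySem.Int.mod 0 tb = 0 := by
        simp [PySem.Int.mod]
      have hd0 : PySem.Int.floordiv 0 tb = 0 := by
        simp [PySem.Int.floordiv]
      simp [hm0, hd0, PySem.List.pyRange_one_eq_nil (le_refl 0)]
    | cons v rest =>
      have hv : v < 0 := by
        rcases hE with h | h
        · exact absurd h (by simp)
        · simpa using h
      have hc : (v < 0 ∨ pyShr v fb ≠ 0) := Or.inl hv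
      unfold Spec_ConvertToBits ConvertToBits ConvertToBits_alt
      simp [CTB_step, CTB_big, hc, foldA_none, foldB_none]
  obtain ⟨f, rfl⟩ := Int.eq_ofNat_of_zero_le hf
  obtain ⟨t, rfl⟩ := Int.eq_ofNat_of_zero_le (by omega : (0:Int) ≤ tb)
  have ht : 1 ≤ t := by exact_mod_cast htb
  unfold Spec_ConvertToBits ConvertToBits ConvertToBits_alt
  have hmaxv : pyShl 1 ((t : Nat) : Int) - 1 = (2 : Int) ^ t - 1 := by
    simp [pyShl, Int.shiftLeft_eq]
  have hmaxacc : pyShl 1 (((f : Nat) : Int) + ((t : Nat) : Int) - 1) - 1 = (2 : Int) ^ (f + t - 1) - 1 := by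
    have h1 : (((f : Nat) : Int) + ((t : Nat) : Int) - 1).toNat = f + t - 1 := by omega
    simp [pyShl, h1, Int.shiftLeft_eq]
  have htot : (data.length : Int) * ((f : Nat) : Int) = ((f * data.length : Nat) : Int) := by
    push_cast; ring
  by_cases hvalid : ∀ v ∈ data, 0 ≤ v ∧ v < (2:Int) ^ f
  · have hA := foldA_spec f t ht data hvalid 0 0 []
    have hB := foldB_valid f data hvalid 0
    simp only [Nat.zero_mod, Nat.cast_zero, chunks_T_zero, List.append_nil, List.nil_append, Nat.zero_add, Nat.cast_ofNat] at hA hB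
    simp only [hmaxv, hmaxacc, hA, hB, htot]
    have hR : f * data.length % t < t := Nat.mod_lt _ (by omega)
    rw [PySem.Int.mod_natCast, retB_eq f t ht, tail_mask _ f t _ ht hR]
  · have hA := foldA_invalid f t ht data hvalid 0 0 []
    have hB := foldB_invalid f data hvalid 0
    simp only [Nat.zero_mod, Nat.cast_zero, chunks_T_zero, List.append_nil, List.nil_append] at hA hB
    simp only [hmaxv, hmaxacc, hA, hB]
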